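-- pv_equiv track=rewrite | github.com/robert-gaines/python | Python-Penetration-Testing/WirelessSniffer.py | FormatMac
-- ===== SOURCE A (Python) =====
-- def FormatMac(MacAddr):
--     #
--     newMacAddr = ""
--     #
--     i = 0
--     #
--     while(i <= len(MacAddr)-2):
--         #
--         for j in range(0,2):
--             #
--             newMacAddr += MacAddr[i]
--             #
--             i += 1
--             #
--         newMacAddr += ":"
--         #
--     newMacAddr = newMacAddr[0:len(newMacAddr)-1]
--     #
--     return newMacAddr
-- ===== SOURCE B (Python) =====
-- def FormatMac(MacAddr):
--     return ":".join(MacAddr[i:i+2] for i in range(0, len(MacAddr) - 1, 2))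
-- ===== Notes on version B (the rewrite author's own statement) =====
-- stated objective: simpler
-- what changed: Replaced the index-driven while/for character accumulation with a trailing-colon strip by a single pass that slices the string into 2-character chunks and joins them with a colon separator.
import Mathlib
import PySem

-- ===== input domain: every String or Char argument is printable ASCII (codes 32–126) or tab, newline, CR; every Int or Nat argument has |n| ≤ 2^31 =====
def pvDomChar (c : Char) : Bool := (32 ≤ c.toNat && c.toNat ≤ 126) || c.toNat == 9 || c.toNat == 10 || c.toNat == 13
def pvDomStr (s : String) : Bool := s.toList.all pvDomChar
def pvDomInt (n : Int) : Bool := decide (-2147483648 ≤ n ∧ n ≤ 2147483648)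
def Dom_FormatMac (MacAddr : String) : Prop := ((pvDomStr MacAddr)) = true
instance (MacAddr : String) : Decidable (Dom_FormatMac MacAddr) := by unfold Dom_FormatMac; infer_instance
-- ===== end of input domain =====

-- B replaces A's index-driven while/for accumulation plus trailing-colon strip by a single
-- chunk-and-join pass (2-char slices joined with ':'); objective: simpler.

-- ===== PORT A =====
-- while (i <= len-2): for j in range(0,2): newMacAddr += MacAddr[i]; i += 1; then += ":".
-- Indexing MacAddr[i] is always in range here (i+1 ≤ len-1), so getD is exact.
def FormatMacLoopA (s : List Char) (i : Nat) (acc : List Char) : List Char :=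
  if i + 2 ≤ s.length then
    FormatMacLoopA s (i + 2) (acc ++ [s.getD i ' ', s.getD (i + 1) ' ', ':'])
  else acc
termination_by s.length - i

def FormatMac (MacAddr : String) : String :=
  let s := MacAddr.toList
  let acc := FormatMacLoopA s 0 []
  -- newMacAddr[0:len(newMacAddr)-1]
  String.ofList (PySem.List.slice acc (some 0) (some ((acc.length : Int) - 1)))

-- ===== PORT B =====
-- ":".join(MacAddr[i:i+2] for i in range(0, len(MacAddr) - 1, 2))
def FormatMac_alt (MacAddr : String) : String :=
  PySem.Str.join ":"
    ((PySem.List.pyRange 0 (PySem.Str.len MacAddr - 1) 2).map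
      (fun i => PySem.Str.slice MacAddr (some i) (some (i + 2))))

-- ===== PRECONDITION & SPEC =====
def Spec_FormatMac (MacAddr : String) (out : String) : Prop := out = FormatMac_alt MacAddr
instance (MacAddr : String) (out : String) : Decidable (Spec_FormatMac MacAddr out) := by unfold Spec_FormatMac; infer_instance

-- ===== CLAIM (what is proved, stated in full; the proofs are below) =====
def Claim_equal_FormatMac : Prop := ∀ (MacAddr : String), Dom_FormatMac MacAddr → Spec_FormatMac MacAddr (FormatMac MacAddr)

-- ===== LEMMAS AND PROOFS =====

-- Characterisation of A: the pair-wise colon-terminated rendering.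
def pvG : List Char → List Char
  | a :: b :: r => a :: b :: ':' :: pvG r
  | _ => []

-- The chunk list B slices out.
def pvPairs : List Char → List (List Char)
  | a :: b :: r => [a, b] :: pvPairs r
  | _ => []

theorem pvG_short (s : List Char) (h : s.length < 2) : pvG s = [] := by
  match s, h with
  | [], _ => rfl
  | [a], _ => rfl

theorem loopA_eq (s : List Char) (i : Nat) (acc : List Char) :
    FormatMacLoopA s i acc = acc ++ pvG (s.drop i) := by
  rw [FormatMacLoopA]
  split
  · rename_i h
    have h1 : i < s.length := by omega
    have h2 : i + 1 < s.length := by omega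
    have hd : s.drop i = s[i] :: s[i+1] :: s.drop (i + 2) := by
      rw [List.drop_eq_getElem_cons h1]
      congr 1
      rw [List.drop_eq_getElem_cons h2]
    rw [loopA_eq s (i + 2), hd]
    simp only [pvG, List.getD, List.getElem?_eq_getElem h1, List.getElem?_eq_getElem h2,
      Option.getD_some, List.append_assoc]
    rfl
  · rename_i h
    have : (s.drop i).length < 2 := by simp; omega
    simp [pvG_short _ this]
termination_by s.length - i

theorem slice_len_sub_one (xs : List Char) :
    PySem.List.slice xs (some 0) (some ((xs.length : Int) - 1)) = xs.dropLast := by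
  cases xs with
  | nil => simp [PySem.List.slice]
  | cons a t =>
    have h : ((a :: t).length : Int) - 1 = ((t.length : Nat) : Int) := by simp
    rw [h]
    simp [PySem.List.slice_to_natCast, List.dropLast_eq_take]

theorem pairs_eq_range (l : List Char) :
    pvPairs l = (List.range (l.length / 2)).map (fun k => (l.drop (2 * k)).take 2) := by
  match l with
  | [] => rfl
  | [a] => simp [pvPairs]
  | a :: b :: r =>
    have hlen : (a :: b :: r).length / 2 = r.length / 2 + 1 := by simp; omega
    rw [show pvPairs (a :: b :: r) = [a, b] :: pvPairs r from rfl, hlen,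
      List.range_succ_eq_map, List.map_cons, List.map_map]
    refine List.cons_eq_cons.mpr ⟨by simp, ?_⟩
    rw [pairs_eq_range r]
    apply List.map_congr_left
    intro k _
    show List.take 2 (List.drop (2 * k) r)
        = List.take 2 (List.drop (2 * Nat.succ k) (a :: b :: r))
    have h2 : 2 * Nat.succ k = (2 * k) + 1 + 1 := by omega
    rw [h2, List.drop_succ_cons, List.drop_succ_cons]

theorem map_slice_pyRange (l : List Char) :
    (PySem.List.pyRange 0 ((l.length : Int) - 1) 2).map
        (fun i => PySem.List.slice l (some i) (some (i + 2)))
      = pvPairs l := by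
  rw [PySem.List.pyRange_of_pos 0 ((l.length : Int) - 1) (by norm_num)]
  have hcount : (if (0:Int) < (l.length : Int) - 1 then (((l.length : Int) - 1 - 0 + 2 - 1) / 2).toNat else 0)
      = l.length / 2 := by
    split
    · rename_i h
      have : ((l.length : Int) - 1 - 0 + 2 - 1) = (l.length : Int) := by ring
      rw [this]
      omega
    · rename_i h
      omega
  rw [hcount, pairs_eq_range, List.map_map]
  apply List.map_congr_left
  intro k _
  show PySem.List.slice l (some (0 + 2 * (k : Int))) (some (0 + 2 * (k : Int) + 2)) = _
  have h1 : (0 : Int) + 2 * (k : Int) = ((2 * k : Nat) : Int) := by push_cast; ring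
  have h2 : (0 : Int) + 2 * (k : Int) + 2 = ((2 * k : Nat) : Int) + ((2 : Nat) : Int) := by push_cast; ring
  rw [h2, h1, PySem.List.slice_natCast_add]

theorem join_pairs (l : List Char) :
    PySem.Chars.join [':'] (pvPairs l) = (pvG l).dropLast := by
  match l with
  | [] => rfl
  | [a] => rfl
  | a :: b :: r =>
    rw [pvPairs, pvG]
    match hr : pvPairs r with
    | [] =>
      have : pvG r = [] := by
        match r, hr with
        | [], _ => rfl
        | [x], _ => rfl
      simp [this, PySem.Chars.join_singleton]
    | q :: rest =>
      have hgr : pvG r ≠ [] := by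
        match r, hr with
        | x :: y :: r', _ => simp [pvG]
      rw [PySem.Chars.join_cons_cons, ← hr, join_pairs r]
      rw [show a :: b :: ':' :: pvG r = [a, b, ':'] ++ pvG r by rfl]
      rw [List.dropLast_append_of_ne_nil hgr]
      simp

-- ===== VERDICT (by name: the statement is the Claim_ definition above) =====
theorem FormatMac_spec : Claim_equal_FormatMac := by
  intro s _
  show FormatMac s = FormatMac_alt s
  have hA : (FormatMac s).toList = (pvG s.toList).dropLast := by
    simp only [FormatMac, loopA_eq, List.drop_zero, List.nil_append]
    rw [slice_len_sub_one]
    simp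
  have hB : (FormatMac_alt s).toList = (pvG s.toList).dropLast := by
    simp only [FormatMac_alt, PySem.Str.toList_join, List.map_map]
    have : (fun i => (PySem.Str.slice s (some i) (some (i + 2))).toList)
        = (fun i => PySem.List.slice s.toList (some i) (some (i + 2))) := by
      funext i; simp [PySem.Str.slice]
    rw [PySem.Str.len_eq]
    calc PySem.Chars.join ":".toList
          ((PySem.List.pyRange 0 ((s.toList.length : Int) - 1) 2).map
            (String.toList ∘ fun i => PySem.Str.slice s (some i) (some (i + 2))))
        = PySem.Chars.join [':'] (pvPairs s.toList) := by
          rw [← map_slice_pyRange s.toList]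
          congr 1
          apply List.map_congr_left
          intro i _
          simp [PySem.Str.slice]
      _ = (pvG s.toList).dropLast := join_pairs s.toList
  have := hA.trans hB.symm
  exact String.toList_injective this
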